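-- pv_equiv track=rewrite | github.com/Wbrown633/ChessGame | chessGame.py | findStraightPath
-- ===== SOURCE A (Python) =====
-- def findStraightPath(start, end):
--     listofCoords = []
--
--     # Horizontal Line
--     if start[1] == end[1]:
--         # move left
--         if start[0] > end[0]:
--             while start[0] > end[0] + 1:
--                 start = (start[0] - 1, start[1])
--                 listofCoords.append(start)
--
--         # move right
--         else:
--             while start[0] < end[0] - 1:
--                 start = (start[0] + 1, start[1])
--                 listofCoords.append(start)
--
--     # Vertical Line
--     else:
--         # move up
--         if start[1] < end[1]:
--             while start[1] < end[1] - 1: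
--                 start = (start[0], start[1] + 1)
--                 listofCoords.append(start)
--
--         # move down
--         else:
--             while start[1] > end[1] + 1:
--                 start = (start[0], start[1] - 1)
--                 listofCoords.append(start)
--     return listofCoords
-- ===== SOURCE B (Python) =====
-- def findStraightPath(start, end):
--     # compute axis, unit step and number of intermediate squares, then one pass
--     if start[1] == end[1]:
--         d = end[0] - start[0]
--         step = ((d > 0) - (d < 0), 0)
--     else:
--         d = end[1] - start[1]
--         step = (0, (d > 0) - (d < 0))
--     count = abs(d) - 1
--     return [(start[0] + step[0] * i, start[1] + step[1] * i)
--             for i in range(1, count + 1)]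
-- ===== Notes on version B (the rewrite author's own statement) =====
-- stated objective: simpler
-- what changed: Replaces A's four separate mutating while-loops (one per direction) by one direction+count computation followed by a single generating pass over range(1, count+1).
import Mathlib
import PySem

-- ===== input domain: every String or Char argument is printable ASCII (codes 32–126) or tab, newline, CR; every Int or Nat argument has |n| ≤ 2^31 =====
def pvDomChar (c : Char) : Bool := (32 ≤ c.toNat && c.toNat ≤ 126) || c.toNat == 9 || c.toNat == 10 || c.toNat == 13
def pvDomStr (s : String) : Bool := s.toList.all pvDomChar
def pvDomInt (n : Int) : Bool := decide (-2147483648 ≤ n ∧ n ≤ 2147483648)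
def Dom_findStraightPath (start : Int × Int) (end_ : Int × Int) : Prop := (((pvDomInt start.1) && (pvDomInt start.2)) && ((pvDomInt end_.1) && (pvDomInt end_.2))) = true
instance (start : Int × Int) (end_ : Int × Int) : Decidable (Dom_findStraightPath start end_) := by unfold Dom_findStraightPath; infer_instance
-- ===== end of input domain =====

-- B replaces A's four mutating while-loops by one direction+count computation and a
-- single generating pass (objective: simpler; same behaviour, diagonals treated as vertical like A).

-- ===== PORT A =====
-- the four while-loops of A, each appending the moved 'start' to the accumulator
def pvGoLeft (s : Int × Int) (e : Int × Int) (acc : List (Int × Int)) : List (Int × Int) :=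
  if s.1 > e.1 + 1 then pvGoLeft (s.1 - 1, s.2) e (acc ++ [(s.1 - 1, s.2)]) else acc
termination_by (s.1 - e.1).toNat
decreasing_by omega

def pvGoRight (s : Int × Int) (e : Int × Int) (acc : List (Int × Int)) : List (Int × Int) :=
  if s.1 < e.1 - 1 then pvGoRight (s.1 + 1, s.2) e (acc ++ [(s.1 + 1, s.2)]) else acc
termination_by (e.1 - s.1).toNat
decreasing_by omega

def pvGoUp (s : Int × Int) (e : Int × Int) (acc : List (Int × Int)) : List (Int × Int) :=
  if s.2 < e.2 - 1 then pvGoUp (s.1, s.2 + 1) e (acc ++ [(s.1, s.2 + 1)]) else acc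
termination_by (e.2 - s.2).toNat
decreasing_by omega

def pvGoDown (s : Int × Int) (e : Int × Int) (acc : List (Int × Int)) : List (Int × Int) :=
  if s.2 > e.2 + 1 then pvGoDown (s.1, s.2 - 1) e (acc ++ [(s.1, s.2 - 1)]) else acc
termination_by (s.2 - e.2).toNat
decreasing_by omega

def findStraightPath (start : Int × Int) (end_ : Int × Int) : List (Int × Int) :=
  if start.2 == end_.2 then
    if start.1 > end_.1 then pvGoLeft start end_ []
    else pvGoRight start end_ []
  else
    if start.2 < end_.2 then pvGoUp start end_ []
    else pvGoDown start end_ []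

-- ===== PORT B =====
-- python's (d > 0) - (d < 0)
def pvSign (d : Int) : Int := (if d > 0 then 1 else 0) - (if d < 0 then 1 else 0)

def findStraightPath_alt (start : Int × Int) (end_ : Int × Int) : List (Int × Int) :=
  let sc : (Int × Int) × Int :=
    if start.2 == end_.2 then ((pvSign (end_.1 - start.1), 0), (end_.1 - start.1).natAbs - 1)
    else ((0, pvSign (end_.2 - start.2)), (end_.2 - start.2).natAbs - 1)
  (PySem.List.pyRange 1 (sc.2 + 1) 1).map
    (fun i => (start.1 + sc.1.1 * i, start.2 + sc.1.2 * i))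

-- ===== PRECONDITION & SPEC =====
def Spec_findStraightPath (start : Int × Int) (end_ : Int × Int) (out : List (Int × Int)) : Prop := out = findStraightPath_alt start end_
instance (start : Int × Int) (end_ : Int × Int) (out : List (Int × Int)) : Decidable (Spec_findStraightPath start end_ out) := by unfold Spec_findStraightPath; infer_instance

-- ===== CLAIM (what is proved, stated in full; the proofs are below) =====
def Claim_equal_findStraightPath : Prop := ∀ (start : Int × Int) (end_ : Int × Int), Dom_findStraightPath start end_ → Spec_findStraightPath start end_ (findStraightPath start end_)

-- ===== LEMMAS AND PROOFS =====

theorem pvGoRight_eq (n : ℕ) : ∀ (sx sy : Int) (e : Int × Int) (acc : List (Int × Int)),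
    (e.1 - sx - 1).toNat = n →
    pvGoRight (sx, sy) e acc = acc ++ (List.range n).map (fun (k : ℕ) => (sx + 1 + (k : Int), sy)) := by
  induction n with
  | zero =>
    intro sx sy e acc h
    rw [pvGoRight]
    simp only [List.range_zero, List.map_nil, List.append_nil]
    rw [if_neg (by simp; omega)]
  | succ m ih =>
    intro sx sy e acc h
    rw [pvGoRight, if_pos (by simp; omega)]
    rw [ih (sx + 1) sy e _ (by omega), List.range_succ_eq_map]
    simp only [List.map_cons, List.map_map, List.append_assoc, List.cons_append,
      List.nil_append, Function.comp_def, Nat.cast_zero]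
    congr 1
    congr 1
    · simp only [Prod.mk.injEq, and_true, true_and]
      omega
    · apply List.map_congr_left
      intro k _
      simp only [Prod.mk.injEq, Nat.cast_succ, and_true, true_and]
      omega

theorem pvGoLeft_eq (n : ℕ) : ∀ (sx sy : Int) (e : Int × Int) (acc : List (Int × Int)),
    (sx - e.1 - 1).toNat = n →
    pvGoLeft (sx, sy) e acc = acc ++ (List.range n).map (fun (k : ℕ) => (sx - 1 - (k : Int), sy)) := by
  induction n with
  | zero =>
    intro sx sy e acc h
    rw [pvGoLeft]
    simp only [List.range_zero, List.map_nil, List.append_nil]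
    rw [if_neg (by simp; omega)]
  | succ m ih =>
    intro sx sy e acc h
    rw [pvGoLeft, if_pos (by simp; omega)]
    rw [ih (sx - 1) sy e _ (by omega), List.range_succ_eq_map]
    simp only [List.map_cons, List.map_map, List.append_assoc, List.cons_append,
      List.nil_append, Function.comp_def, Nat.cast_zero]
    congr 1
    congr 1
    · simp only [Prod.mk.injEq, and_true, true_and]
      omega
    · apply List.map_congr_left
      intro k _
      simp only [Prod.mk.injEq, Nat.cast_succ, and_true, true_and]
      omega

theorem pvGoUp_eq (n : ℕ) : ∀ (sx sy : Int) (e : Int × Int) (acc : List (Int × Int)),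
    (e.2 - sy - 1).toNat = n →
    pvGoUp (sx, sy) e acc = acc ++ (List.range n).map (fun (k : ℕ) => (sx, sy + 1 + (k : Int))) := by
  induction n with
  | zero =>
    intro sx sy e acc h
    rw [pvGoUp]
    simp only [List.range_zero, List.map_nil, List.append_nil]
    rw [if_neg (by simp; omega)]
  | succ m ih =>
    intro sx sy e acc h
    rw [pvGoUp, if_pos (by simp; omega)]
    rw [ih sx (sy + 1) e _ (by omega), List.range_succ_eq_map]
    simp only [List.map_cons, List.map_map, List.append_assoc, List.cons_append,
      List.nil_append, Function.comp_def, Nat.cast_zero]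
    congr 1
    congr 1
    · simp only [Prod.mk.injEq, and_true, true_and]
      omega
    · apply List.map_congr_left
      intro k _
      simp only [Prod.mk.injEq, Nat.cast_succ, and_true, true_and]
      omega

theorem pvGoDown_eq (n : ℕ) : ∀ (sx sy : Int) (e : Int × Int) (acc : List (Int × Int)),
    (sy - e.2 - 1).toNat = n →
    pvGoDown (sx, sy) e acc = acc ++ (List.range n).map (fun (k : ℕ) => (sx, sy - 1 - (k : Int))) := by
  induction n with
  | zero =>
    intro sx sy e acc h
    rw [pvGoDown]
    simp only [List.range_zero, List.map_nil, List.append_nil]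
    rw [if_neg (by simp; omega)]
  | succ m ih =>
    intro sx sy e acc h
    rw [pvGoDown, if_pos (by simp; omega)]
    rw [ih sx (sy - 1) e _ (by omega), List.range_succ_eq_map]
    simp only [List.map_cons, List.map_map, List.append_assoc, List.cons_append,
      List.nil_append, Function.comp_def, Nat.cast_zero]
    congr 1
    congr 1
    · simp only [Prod.mk.injEq, and_true, true_and]
      omega
    · apply List.map_congr_left
      intro k _
      simp only [Prod.mk.injEq, Nat.cast_succ, and_true, true_and]
      omega

-- ===== VERDICT (by name: the statement is the Claim_ definition above) =====
theorem findStraightPath_spec : Claim_equal_findStraightPath := by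
  intro start end_ _
  obtain ⟨sx, sy⟩ := start
  obtain ⟨ex, ey⟩ := end_
  unfold Spec_findStraightPath findStraightPath findStraightPath_alt
  simp only [beq_iff_eq]
  by_cases hy : sy = ey
  · rw [if_pos hy, if_pos hy]
    by_cases hx : sx > ex
    · rw [if_pos hx]
      rw [pvGoLeft_eq (sx - ex - 1).toNat sx sy (ex, ey) [] rfl]
      simp only [List.nil_append]
      rw [PySem.List.pyRange_one, List.map_map]
      have hsign : pvSign (ex - sx) = -1 := by simp only [pvSign]; split_ifs <;> omega
      simp only [hsign]
      have hc : ((((ex - sx).natAbs - 1 : Int) + 1 - 1).toNat) = (sx - ex - 1).toNat := by omega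
      rw [hc]
      apply List.map_congr_left
      intro k _
      simp only [Function.comp_def, Prod.mk.injEq]
      refine ⟨?_, ?_⟩ <;> push_cast <;> ring_nf
    · rw [if_neg hx]
      rw [pvGoRight_eq (ex - sx - 1).toNat sx sy (ex, ey) [] rfl]
      simp only [List.nil_append]
      rw [PySem.List.pyRange_one, List.map_map]
      have hc : ((((ex - sx).natAbs - 1 : Int) + 1 - 1).toNat) = (ex - sx - 1).toNat := by omega
      rw [hc]
      by_cases hz : sx = ex
      · have h0 : (ex - sx - 1).toNat = 0 := by omega
        rw [h0]; simp
      · have hsign : pvSign (ex - sx) = 1 := by simp only [pvSign]; split_ifs <;> omega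
        simp only [hsign]
        apply List.map_congr_left
        intro k _
        simp only [Function.comp_def, Prod.mk.injEq]
        refine ⟨?_, ?_⟩ <;> push_cast <;> ring_nf
  · rw [if_neg hy, if_neg hy]
    by_cases hv : sy < ey
    · rw [if_pos hv]
      rw [pvGoUp_eq (ey - sy - 1).toNat sx sy (ex, ey) [] rfl]
      simp only [List.nil_append]
      rw [PySem.List.pyRange_one, List.map_map]
      have hsign : pvSign (ey - sy) = 1 := by simp only [pvSign]; split_ifs <;> omega
      simp only [hsign]
      have hc : ((((ey - sy).natAbs - 1 : Int) + 1 - 1).toNat) = (ey - sy - 1).toNat := by omega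
      rw [hc]
      apply List.map_congr_left
      intro k _
      simp only [Function.comp_def, Prod.mk.injEq]
      refine ⟨?_, ?_⟩ <;> push_cast <;> ring_nf
    · rw [if_neg hv]
      rw [pvGoDown_eq (sy - ey - 1).toNat sx sy (ex, ey) [] rfl]
      simp only [List.nil_append]
      rw [PySem.List.pyRange_one, List.map_map]
      have hsign : pvSign (ey - sy) = -1 := by simp only [pvSign]; split_ifs <;> omega
      simp only [hsign]
      have hc : ((((ey - sy).natAbs - 1 : Int) + 1 - 1).toNat) = (sy - ey - 1).toNat := by omega
      rw [hc]
      apply List.map_congr_left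
      intro k _
      simp only [Function.comp_def, Prod.mk.injEq]
      refine ⟨?_, ?_⟩ <;> push_cast <;> ring_nf
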